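-- pv_equiv track=rewrite | github.com/science-for-democracy/mapof-elections | src/mapof/elections/cultures/compass.py | _distribute_in_matrix
-- ===== SOURCE A (Python) =====
-- def _distribute_in_matrix(n, m):
--     if m == 0:
--         return []
--     k = n // m
--     r = n - k * m
--     matrix = []
--     for i in range(m):
--         row = [k for _ in range(m)]
--         for j in range(i, i + r):
--             if j >= m:
--                 j = j - m
--             row[j] = row[j] + 1
--         matrix.append(row)
--     return matrix
-- ===== SOURCE B (Python) =====
-- def _distribute_in_matrix(n, m):
--     if m == 0:
--         return []
--     k = n // m
--     r = n % m
--     row = [k + 1] * r + [k] * (m - r)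
--     matrix = []
--     for _ in range(m):
--         matrix.append(row)
--         row = row[-1:] + row[:-1]
--     return matrix
-- ===== Notes on version B (the rewrite author's own statement) =====
-- stated objective: alternative
-- what changed: Instead of rebuilding each row and walking a wrapping increment window per row, B materialises the first row once as [k+1]*r + [k]*(m-r) by list concatenation and derives every subsequent row from the previous one by a one-step right rotation (row[-1:] + row[:-1]).
import Mathlib
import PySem

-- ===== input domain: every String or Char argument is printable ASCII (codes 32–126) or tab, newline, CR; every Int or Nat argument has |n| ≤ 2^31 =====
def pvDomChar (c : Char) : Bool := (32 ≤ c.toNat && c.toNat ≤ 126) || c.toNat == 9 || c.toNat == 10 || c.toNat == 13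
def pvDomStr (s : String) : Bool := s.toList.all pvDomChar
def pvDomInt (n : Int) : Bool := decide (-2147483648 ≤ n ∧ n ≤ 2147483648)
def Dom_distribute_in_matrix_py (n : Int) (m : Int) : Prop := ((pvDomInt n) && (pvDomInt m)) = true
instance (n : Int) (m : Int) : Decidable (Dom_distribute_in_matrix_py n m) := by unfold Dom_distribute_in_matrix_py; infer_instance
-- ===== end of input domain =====

-- B builds the first row once by concatenation and derives each next row by a
-- one-step right rotation of the previous row; objective: alternative.

-- ===== PORT A =====
-- literal transliteration of _distribute_in_matrix: row[j] access/assignment is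
-- ported with pyGetD/pySetD (the index is always in range when Python runs it).
def distribute_in_matrix_py (n : Int) (m : Int) : List (List Int) :=
  if m == 0 then [] else
  let k := PySem.Int.floordiv n m
  let r := n - k * m
  (PySem.List.pyRange 0 m 1).foldl (fun matrix i =>
    let row := (PySem.List.pyRange 0 m 1).map (fun _ => k)
    let row := (PySem.List.pyRange i (i + r) 1).foldl (fun row j =>
      let j' := if j ≥ m then j - m else j
      PySem.List.pySetD row j' (PySem.List.pyGetD row j' 0 + 1)) row
    matrix ++ [row]) []

-- ===== PORT B =====
-- transliteration of Source B: row = [k+1]*r + [k]*(m-r); m times append row and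
-- rotate it right by one (row = row[-1:] + row[:-1]).
def distribute_in_matrix_py_alt (n : Int) (m : Int) : List (List Int) :=
  if m == 0 then [] else
  let k := PySem.Int.floordiv n m
  let r := PySem.Int.mod n m
  let row := PySem.List.pyRepeat [k + 1] r ++ PySem.List.pyRepeat [k] (m - r)
  ((PySem.List.pyRange 0 m 1).foldl
    (fun (st : List (List Int) × List Int) _ =>
      (st.1 ++ [st.2],
       PySem.List.slice st.2 (some (-1)) none ++ PySem.List.slice st.2 none (some (-1))))
    ([], row)).1

-- ===== PRECONDITION & SPEC =====
def Spec_distribute_in_matrix_py (n : Int) (m : Int) (out : List (List Int)) : Prop := out = distribute_in_matrix_py_alt n m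
instance (n : Int) (m : Int) (out : List (List Int)) : Decidable (Spec_distribute_in_matrix_py n m out) := by unfold Spec_distribute_in_matrix_py; infer_instance

-- ===== CLAIM (what is proved, stated in full; the proofs are below) =====
def Claim_equal_distribute_in_matrix_py : Prop := ∀ (n : Int) (m : Int), Dom_distribute_in_matrix_py n m → Spec_distribute_in_matrix_py n m (distribute_in_matrix_py n m)

-- ===== LEMMAS AND PROOFS =====

-- The closed-form row both sides are shown to equal: cell j of row i.
def pvRow (m r k i : Int) : List Int :=
  (PySem.List.pyRange 0 m 1).map (fun j => if (j - i) % m < r then k + 1 else k)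

-- A's inner window loop over range(i, i+r) on a row of k's yields pvRow.
theorem pv_row_eq (m i k : Int) (hm : 0 < m) (hi0 : 0 ≤ i) (him : i < m) :
    ∀ rn : Nat, (rn : Int) ≤ m →
    (PySem.List.pyRange i (i + rn) 1).foldl
      (fun row j =>
        PySem.List.pySetD row (if j ≥ m then j - m else j)
          (PySem.List.pyGetD row (if j ≥ m then j - m else j) 0 + 1))
      ((PySem.List.pyRange 0 m 1).map (fun _ => k))
    = pvRow m rn k i := by
  intro rn
  induction rn with
  | zero =>
    intro _
    rw [show i + ((0:Nat):Int) = i by push_cast; ring, PySem.List.pyRange_one_eq_nil le_rfl]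
    simp only [List.foldl_nil, pvRow]
    apply List.map_congr_left
    intro j hj
    have : 0 ≤ (j - i) % m := Int.emod_nonneg _ (by omega)
    simp
    omega
  | succ rn ih =>
    intro hle
    have hle' : (rn : Int) ≤ m := by push_cast at hle ⊢; omega
    rw [show i + ((rn + 1 : Nat) : Int) = (i + rn) + 1 by push_cast; ring,
        PySem.List.pyRange_one_succ_right (by omega),
        List.foldl_append, ih hle']
    simp only [List.foldl_cons, List.foldl_nil, pvRow]
    set p : Int := if i + (rn:Int) ≥ m then i + rn - m else i + rn with hp
    have hp0 : 0 ≤ p := by simp only [hp]; split <;> omega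
    have hpm : p < m := by push_cast at hle; simp only [hp]; split <;> omega
    have hrn : ((rn:Int)) % m = rn :=
      Int.emod_eq_of_lt (by omega) (by push_cast at hle; omega)
    have hpmod : (p - i) % m = (rn : Int) := by
      simp only [hp]; split
      · rw [show i + (rn:Int) - m - i = (rn:Int) - m by ring, Int.sub_emod_right, hrn]
      · rw [show i + (rn:Int) - i = (rn:Int) by ring, hrn]
    set f : Int → Int := fun j => if (j - i) % m < (rn:Int) then k + 1 else k with hf
    have hlen : ((PySem.List.pyRange 0 m 1).map f).length = m.toNat := by
      simp [PySem.List.length_pyRange_one]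
    rw [PySem.List.pySetD_of_nonneg _ _ hp0,
        PySem.List.pyGetD_eq_getElem _ _ hp0 (by simp [hlen]; omega)]
    apply List.ext_getElem
    · simp [hlen, PySem.List.length_pyRange_one]
    · intro t h1 h2
      have ht : (t:Int) < m := by
        simp only [List.length_set, hlen] at h1; omega
      rw [List.getElem_set]
      have hget : ∀ (g : Int → Int) (u : Nat) (h : u < ((PySem.List.pyRange 0 m 1).map g).length),
          ((PySem.List.pyRange 0 m 1).map g)[u] = g u := by
        intro g u h
        rw [List.getElem_map, PySem.List.getElem_pyRange_one]
        norm_num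
      have hmodt : 0 ≤ ((t:Int) - i) % m ∧ ((t:Int) - i) % m < m :=
        ⟨Int.emod_nonneg _ (by omega), Int.emod_lt_of_pos _ hm⟩
      by_cases hpt : p.toNat = t
      · have hpe : p = (t:Int) := by omega
        rw [if_pos hpt, hget, hget]
        have h1 : f p = k := by simp only [hf]; rw [if_neg (by rw [hpmod]; omega)]
        have h2 : ((t:Int) - i) % m = (rn:Int) := by rw [← hpe, hpmod]
        rw [show ((p.toNat : Int)) = p by omega, h1]
        simp only [h2]
        rw [if_pos (by push_cast; omega)]
      · rw [if_neg hpt, hget, hget]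
        have hne : ((t:Int) - i) % m ≠ (rn:Int) := by
          intro hc
          have h3 : ((t:Int) - i) % m = (p - i) % m := by rw [hc, hpmod]
          have h4 : ((t:Int) - i - (p - i)) % m = 0 := by
            rw [Int.sub_emod, h3, sub_self, Int.zero_emod]
          have h5 : m ∣ ((t:Int) - p) := by
            have := Int.dvd_of_emod_eq_zero h4
            simpa [show (t:Int) - i - (p - i) = (t:Int) - p by ring] using this
          obtain ⟨c, hc2⟩ := h5
          have : p = (t:Int) := by
            rcases lt_trichotomy c 0 with h | h | h
            · nlinarith
            · rw [h, mul_zero] at hc2; omega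
            · nlinarith
          exact hpt (by omega)
        simp only [hf]
        push_cast
        split_ifs <;> omega

-- cell u of pvRow, for any in-range index.
theorem pvRow_getElem (m r k i : Int) (u : Nat) (h : u < (pvRow m r k i).length) :
    (pvRow m r k i)[u] = if ((u : Int) - i) % m < r then k + 1 else k := by
  simp only [pvRow] at h ⊢
  rw [List.getElem_map, PySem.List.getElem_pyRange_one]
  norm_num

theorem pvRow_length (m r k i : Int) : (pvRow m r k i).length = (m - 0).toNat := by
  simp [pvRow, PySem.List.length_pyRange_one]

theorem pv_mod_shift (a m : Int) : (a + m) % m = a % m := by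
  rw [show a + m = a + m * 1 by ring, Int.add_mul_emod_self_left]

-- B's base row [k+1]*r + [k]*(m-r) is pvRow at i = 0.
theorem pv_base_eq (m r k : Int) (hm : 0 < m) (hr0 : 0 ≤ r) (hrm : r < m) :
    PySem.List.pyRepeat [k + 1] r ++ PySem.List.pyRepeat [k] (m - r) = pvRow m r k 0 := by
  rw [PySem.List.pyRepeat_singleton, PySem.List.pyRepeat_singleton]
  apply List.ext_getElem
  · simp [pvRow_length]; omega
  · intro t h1 h2
    have ht : (t : Int) < m := by
      have := pvRow_length m r k 0 ▸ h2; omega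
    rw [pvRow_getElem m r k 0 t h2]
    have htm : ((t : Int) - 0) % m = (t : Int) := by
      rw [sub_zero]; exact Int.emod_eq_of_lt (by omega) ht
    rw [htm]
    by_cases hlt : t < r.toNat
    · rw [List.getElem_append_left (by simp [List.length_replicate]; omega),
          List.getElem_replicate, if_pos (by omega)]
    · rw [List.getElem_append_right (by simp [List.length_replicate]; omega)]
      rw [List.getElem_replicate, if_neg (by omega)]

-- one right-rotation of pvRow i is pvRow (i+1).
theorem pv_rot_eq (m r k i : Int) (hm : 0 < m) :
    PySem.List.slice (pvRow m r k i) (some (-1)) none ++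
      PySem.List.slice (pvRow m r k i) none (some (-1)) = pvRow m r k (i + 1) := by
  rw [PySem.List.slice_from_neg_one, PySem.List.slice_to_neg_one]
  have hlen : (pvRow m r k i).length = m.toNat := by rw [pvRow_length]; omega
  apply List.ext_getElem
  · simp only [List.length_append, List.length_drop, List.length_dropLast, hlen, pvRow_length]
    omega
  · intro t h1 h2
    have ht : t < m.toNat := by have := pvRow_length m r k (i + 1) ▸ h2; omega
    rw [pvRow_getElem m r k (i + 1) t h2]
    by_cases h0 : t = 0
    · subst h0
      rw [List.getElem_append_left (by simp [hlen]; omega), List.getElem_drop,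
          pvRow_getElem]
      have harg : (((pvRow m r k i).length - 1 + 0 : Nat) : Int) - i
          = ((0 : Nat) : Int) - (i + 1) + m := by
        rw [hlen]; omega
      rw [harg, pv_mod_shift]
    · have hd : ((pvRow m r k i).drop ((pvRow m r k i).length - 1)).length = 1 := by
        simp [hlen]; omega
      rw [List.getElem_append_right (by rw [hd]; omega), List.getElem_dropLast,
          pvRow_getElem]
      have harg : ((t - ((pvRow m r k i).drop ((pvRow m r k i).length - 1)).length : Nat) : Int) - i
          = (t : Int) - (i + 1) := by
        rw [hd]; omega
      rw [harg]

-- the rotation loop, run over any list, appends pvRow i, pvRow (i+1), …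
theorem pv_loop (m r k : Int) (hm : 0 < m) :
    ∀ (l : List Int) (i : Int) (acc : List (List Int)),
    (l.foldl
      (fun (st : List (List Int) × List Int) _ =>
        (st.1 ++ [st.2],
         PySem.List.slice st.2 (some (-1)) none ++ PySem.List.slice st.2 none (some (-1))))
      (acc, pvRow m r k i)).1
    = acc ++ (List.range l.length).map (fun t : Nat => pvRow m r k (i + (t : Int))) := by
  intro l
  induction l with
  | nil => intro i acc; simp
  | cons x l ih =>
    intro i acc
    simp only [List.foldl_cons]
    rw [pv_rot_eq m r k i hm, ih (i + 1)]
    rw [List.length_cons, List.range_succ_eq_map, List.map_cons, List.map_map]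
    simp only [Nat.cast_zero, add_zero, List.append_assoc, List.singleton_append]
    congr 1
    congr 1
    apply List.map_congr_left
    intro t _
    simp only [Function.comp]
    congr 1
    omega

theorem pv_main (n m : Int) : distribute_in_matrix_py n m = distribute_in_matrix_py_alt n m := by
  by_cases hm0 : m = 0
  · simp [distribute_in_matrix_py, distribute_in_matrix_py_alt, hm0]
  rcases lt_or_gt_of_ne hm0 with hneg | hpos
  · simp only [distribute_in_matrix_py, distribute_in_matrix_py_alt,
      beq_iff_eq, if_neg hm0, PySem.List.pyRange_one_eq_nil (le_of_lt hneg),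
      List.foldl_nil, List.map_nil]
  · have hr0 : 0 ≤ PySem.Int.mod n m := PySem.Int.mod_nonneg n hpos
    have hrm : PySem.Int.mod n m < m := PySem.Int.mod_lt n hpos
    simp only [distribute_in_matrix_py, distribute_in_matrix_py_alt, beq_iff_eq, if_neg hm0]
    set k := PySem.Int.floordiv n m with hk
    set r := PySem.Int.mod n m with hrdef
    have hr : n - k * m = r := by
      have := PySem.Int.floordiv_mul_add_mod n m
      rw [← hk, ← hrdef] at this; linarith
    rw [hr]
    -- A side: the outer loop is a map of rows
    rw [PySem.List.foldl_append_singleton_eq_map, List.nil_append]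
    -- B side: base row then the rotation loop
    rw [pv_base_eq m r k hpos hr0 hrm, pv_loop m r k hpos _ 0 [], List.nil_append]
    have hB : (List.range ((PySem.List.pyRange 0 m 1).length)).map
          (fun t : Nat => pvRow m r k (0 + (t : Int)))
        = (PySem.List.pyRange 0 m 1).map (fun i => pvRow m r k i) := by
      rw [PySem.List.length_pyRange_one]
      conv_rhs => rw [PySem.List.pyRange_one, List.map_map]
      apply List.map_congr_left
      intro t _
      simp [Function.comp]
    rw [hB]
    apply List.map_congr_left
    intro i hi
    rw [PySem.List.mem_pyRange_one] at hi
    have := pv_row_eq m i k hpos hi.1 hi.2 r.toNat (by omega)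
    rw [Int.toNat_of_nonneg hr0] at this
    exact this

-- ===== VERDICT (by name: the statement is the Claim_ definition above) =====
theorem distribute_in_matrix_py_spec : Claim_equal_distribute_in_matrix_py := by
  intro n m _
  unfold Spec_distribute_in_matrix_py
  exact pv_main n m
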